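-- pv_equiv track=rewrite | github.com/regmikeshav01/Masters | CS_6040/0-basics.py | strcat_list
-- ===== SOURCE A (Python) =====
-- def strcat_list(L):
--     assert type(L) is list
--     ###
--     ### YOUR CODE HERE
--     ###
--     str = ''
--     i = 0
--     revCount = len(L)
--     if revCount == 0 or L is None:
--         str = ''
--     else:
--         str = L[-1]
--         for i in range(1, len(L)):
--             str = str + L[-(i + 1)]
--     return str
-- ===== SOURCE B (Python) =====
-- def strcat_list(L):
--     assert type(L) is list
--     if not L:
--         return ''
--     if len(L) == 1:
--         return L[0]
--     m = len(L) // 2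
--     return strcat_list(L[m:]) + strcat_list(L[:m])
-- ===== Notes on version B (the rewrite author's own statement) =====
-- stated objective: alternative
-- what changed: Replaces A's backwards-indexing accumulator loop by divide-and-conquer: split the list at the midpoint and return strcat_list(right half) + strcat_list(left half), which yields the same reversed concatenation by associativity.
import Mathlib
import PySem

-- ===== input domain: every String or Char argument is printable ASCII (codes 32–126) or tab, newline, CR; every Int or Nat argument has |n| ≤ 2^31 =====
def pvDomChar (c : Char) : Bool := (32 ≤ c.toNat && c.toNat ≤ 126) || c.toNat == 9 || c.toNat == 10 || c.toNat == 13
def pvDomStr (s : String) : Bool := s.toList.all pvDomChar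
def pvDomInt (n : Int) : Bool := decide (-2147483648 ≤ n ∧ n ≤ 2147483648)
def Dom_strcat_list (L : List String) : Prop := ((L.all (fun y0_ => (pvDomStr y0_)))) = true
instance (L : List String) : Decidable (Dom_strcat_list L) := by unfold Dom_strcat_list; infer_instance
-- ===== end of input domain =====

-- B replaces A's backwards-index accumulator loop by divide-and-conquer:
-- strcat_list(L) = strcat_list(L[m:]) + strcat_list(L[:m]) at the midpoint m; equality proved on all inputs.

-- ===== PORT A =====
-- literal port of A: start from L[-1], then append L[-(i+1)] for i in range(1, len(L))
def strcat_list (L : List String) : String :=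
  if L.length = 0 then ""
  else
    (PySem.List.pyRange 1 (L.length : Int) 1).foldl
      (fun s i => s ++ PySem.List.pyGetD L (-(i + 1)) "")
      (PySem.List.pyGetD L (-1) "")

-- ===== PORT B =====
-- literal port of B: empty -> '', singleton -> L[0], else split at m = len(L)//2
-- and return strcat_list_alt(L[m:]) + strcat_list_alt(L[:m])
def strcat_list_alt (L : List String) : String :=
  if L.length = 0 then ""
  else if L.length = 1 then L.headD ""
  else
    let m := L.length / 2
    strcat_list_alt (L.drop m) ++ strcat_list_alt (L.take m)
termination_by L.length
decreasing_by
  · simp only [List.length_drop]; omega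
  · simp only [List.length_take]; omega

-- ===== PRECONDITION & SPEC =====
def Spec_strcat_list (L : List String) (out : String) : Prop := out = strcat_list_alt L
instance (L : List String) (out : String) : Decidable (Spec_strcat_list L out) := by unfold Spec_strcat_list; infer_instance

-- ===== CLAIM (what is proved, stated in full; the proofs are below) =====
def Claim_equal_strcat_list : Prop := ∀ (L : List String), Dom_strcat_list L → Spec_strcat_list L (strcat_list L)

-- ===== LEMMAS AND PROOFS =====

theorem getElem_idx_congr {α : Type} (l : List α) {i j : Nat} (h : i = j) (hi : i < l.length) :
    l[i] = l[j]'(h ▸ hi) := by subst h; rfl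

-- A's loop over x :: M (M nonempty) performs M's loop first and ends by appending x
theorem strcat_list_cons (x : String) (M : List String) (hM : M ≠ []) :
    strcat_list (x :: M) = strcat_list M ++ x := by
  have hm : 1 ≤ M.length := List.length_pos_iff.mpr hM
  have hlen : ((x :: M).length : Int) = (M.length : Int) + 1 := by
    simp [List.length_cons]
  unfold strcat_list
  rw [if_neg (by simp), if_neg (by omega), hlen,
      PySem.List.pyRange_one_succ_right (by exact_mod_cast hm),
      List.foldl_append]
  have hinit : PySem.List.pyGetD (x :: M) (-1) "" = PySem.List.pyGetD M (-1) "" := by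
    rw [PySem.List.pyGetD_neg_one _ _ (by simp), PySem.List.pyGetD_neg_one _ _ hM]
    exact List.getLast_cons hM
  have hbody :
      (PySem.List.pyRange 1 (M.length : Int) 1).foldl
        (fun s i => s ++ PySem.List.pyGetD (x :: M) (-(i + 1)) "")
        (PySem.List.pyGetD (x :: M) (-1) "") =
      (PySem.List.pyRange 1 (M.length : Int) 1).foldl
        (fun s i => s ++ PySem.List.pyGetD M (-(i + 1)) "")
        (PySem.List.pyGetD M (-1) "") := by
    rw [hinit]
    apply PySem.List.foldl_congr_mem
    intro acc i hi
    obtain ⟨h1, h2⟩ := PySem.List.mem_pyRange_one.mp hi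
    obtain ⟨k, rfl⟩ := Int.eq_ofNat_of_zero_le (le_trans (by norm_num) h1)
    have hk1 : 1 ≤ k := by exact_mod_cast h1
    have hk2 : k < M.length := by exact_mod_cast h2
    have e1 : (-(((k : Int)) + 1)) = -((k + 1 : Nat) : Int) := by push_cast; ring
    rw [e1, PySem.List.pyGetD_neg_natCast (x :: M) (k + 1) "" (by omega) (by simp; omega),
        PySem.List.pyGetD_neg_natCast M (k + 1) "" (by omega) (by omega)]
    congr 1
    have e2 : (x :: M).length - (k + 1) = (M.length - (k + 1)) + 1 := by
      simp [List.length_cons]; omega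
    rw [getElem_idx_congr _ e2, List.getElem_cons_succ]
  rw [hbody]
  simp only [List.foldl_cons, List.foldl_nil]
  have elast : (-(((M.length : Int)) + 1)) = -(((M.length + 1 : Nat)) : Int) := by push_cast; ring
  simp only [elast]
  rw [PySem.List.pyGetD_neg_natCast (x :: M) (M.length + 1) "" (by omega) (by simp)]
  simp

-- rc is the straight-line reversed concatenation; both ports are shown equal to it
def rc : List String → String
  | [] => ""
  | x :: M => rc M ++ x

theorem rc_append (A B : List String) : rc (A ++ B) = rc B ++ rc A := by
  induction A with
  | nil => simp [rc]
  | cons x M ih => simp [rc, ih, String.append_assoc]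

theorem strcat_list_eq_rc (L : List String) : strcat_list L = rc L := by
  induction L with
  | nil => simp [strcat_list, rc]
  | cons x M ih =>
    by_cases hM : M = []
    · subst hM
      simp [strcat_list, rc, PySem.List.pyGetD_neg_one, PySem.List.pyRange_one_eq_nil]
    · rw [strcat_list_cons x M hM, ih, rc]

theorem alt_eq_rc_bounded : ∀ (n : Nat) (L : List String), L.length ≤ n → strcat_list_alt L = rc L := by
  intro n
  induction n with
  | zero =>
    intro L h
    have : L = [] := List.eq_nil_of_length_eq_zero (by omega)
    subst this; simp [strcat_list_alt, rc]
  | succ n ih =>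
    intro L h
    match L with
    | [] => simp [strcat_list_alt, rc]
    | [x] => simp [strcat_list_alt, rc]
    | x :: y :: M =>
      have hlen : (x :: y :: M).length = M.length + 2 := by simp
      have h' : (x :: y :: M).length ≤ n + 1 := h
      rw [strcat_list_alt, if_neg (by omega), if_neg (by omega)]
      have h1 : ((x :: y :: M).drop ((x :: y :: M).length / 2)).length ≤ n := by
        rw [List.length_drop]; omega
      have h2 : ((x :: y :: M).take ((x :: y :: M).length / 2)).length ≤ n := by
        rw [List.length_take]; omega
      show strcat_list_alt ((x :: y :: M).drop ((x :: y :: M).length / 2)) ++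
           strcat_list_alt ((x :: y :: M).take ((x :: y :: M).length / 2)) = rc (x :: y :: M)
      rw [ih _ h1, ih _ h2, ← rc_append, List.take_append_drop]

theorem strcat_list_eq_alt (L : List String) : strcat_list L = strcat_list_alt L := by
  rw [strcat_list_eq_rc, alt_eq_rc_bounded L.length L le_rfl]

-- ===== VERDICT (by name: the statement is the Claim_ definition above) =====
theorem strcat_list_spec : Claim_equal_strcat_list := by
  intro L _
  unfold Spec_strcat_list
  exact strcat_list_eq_alt L
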